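-- pv_equiv track=rewrite | github.com/Nareeek/Codesignal_tasks | python/count/countVowelConsonant.py | countVowelConsonant
-- ===== SOURCE A (Python) =====
-- def countVowelConsonant(s):
--     vowels = 'aeiou'
--     summ = 0
--     for x in s:
--         if x in vowels:
--             summ += 1
--         else:
--             summ += 2
--     return summ
-- ===== SOURCE B (Python) =====
-- def countVowelConsonant(s):
--     # Group the string into a character-frequency table, then take the
--     # weighted sum over distinct characters (1 per vowel, 2 otherwise).
--     freq = {}
--     for c in s:
--         freq[c] = freq.get(c, 0) + 1
--     return sum((1 if c in 'aeiou' else 2) * n for c, n in freq.items())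
-- ===== Notes on version B (the rewrite author's own statement) =====
-- stated objective: alternative
-- what changed: B replaces A's per-character branch accumulator with a grouping algorithm: it builds a character-frequency dictionary and computes the total as a weighted sum of weight(char) * multiplicity over the distinct characters.
import Mathlib
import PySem

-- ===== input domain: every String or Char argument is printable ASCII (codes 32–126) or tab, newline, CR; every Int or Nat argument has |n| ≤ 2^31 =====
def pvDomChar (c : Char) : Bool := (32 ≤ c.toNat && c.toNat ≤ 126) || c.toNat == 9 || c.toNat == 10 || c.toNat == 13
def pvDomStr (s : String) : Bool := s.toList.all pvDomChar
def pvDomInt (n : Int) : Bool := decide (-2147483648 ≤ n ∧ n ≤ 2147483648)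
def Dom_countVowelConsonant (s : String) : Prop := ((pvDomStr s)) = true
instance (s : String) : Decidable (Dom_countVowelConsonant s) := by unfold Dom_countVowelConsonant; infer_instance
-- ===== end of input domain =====

-- ===== PORT A =====
-- A: one pass, per-character accumulator: +1 on a vowel, +2 otherwise
def countVowelConsonant (s : String) : Int :=
  s.toList.foldl (fun summ x => if x ∈ "aeiou".toList then summ + 1 else summ + 2) 0

-- ===== PORT B =====
-- B: build a character-frequency dict, then sum weight(char) * multiplicity over distinct chars
def countVowelConsonant_alt (s : String) : Int :=
  let freq :=
    s.toList.foldl (fun d c => PySem.Dict.insert d c (PySem.Dict.getD d c 0 + 1))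
      PySem.Dict.empty
  (freq.items.map (fun p => (if p.1 ∈ "aeiou".toList then (1 : Int) else 2) * p.2)).sum

-- ===== PRECONDITION & SPEC =====
def Spec_countVowelConsonant (s : String) (out : Int) : Prop := out = countVowelConsonant_alt s
instance (s : String) (out : Int) : Decidable (Spec_countVowelConsonant s out) := by unfold Spec_countVowelConsonant; infer_instance

-- ===== CLAIM (what is proved, stated in full; the proofs are below) =====
def Claim_equal_countVowelConsonant : Prop := ∀ (s : String), Dom_countVowelConsonant s → Spec_countVowelConsonant s (countVowelConsonant s)

-- ===== LEMMAS AND PROOFS =====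

-- A's fold adds up the per-character weights
theorem pv_foldA (l : List Char) (a : Int) :
    l.foldl (fun summ x => if x ∈ "aeiou".toList then summ + 1 else summ + 2) a
      = a + (l.map (fun x => if x ∈ "aeiou".toList then (1 : Int) else 2)).sum := by
  induction l generalizing a with
  | nil => simp
  | cons c t ih =>
    rw [List.foldl_cons, ih, List.map_cons, List.sum_cons]
    by_cases h : c ∈ "aeiou".toList
    · rw [if_pos h, if_pos h]; ring
    · rw [if_neg h, if_neg h]; ring

-- summing an indicator over a nodup list containing x yields w x
theorem pv_sum_indicator (w : Char → Int) (u : List Char) (hu : u.Nodup) (x : Char)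
    (hx : x ∈ u) :
    (u.map (fun k => if k = x then w k else 0)).sum = w x := by
  induction u with
  | nil => simp at hx
  | cons b t ih =>
    simp only [List.map_cons, List.sum_cons]
    rcases List.mem_cons.mp hx with h | h
    · subst h
      have hz : ∀ k ∈ t, (if k = x then w k else 0) = 0 := by
        intro k hk
        have hne : k ≠ x := fun he => (List.nodup_cons.mp hu).1 (he ▸ hk)
        simp [hne]
      rw [if_pos rfl, List.sum_eq_zero (by simpa using hz)]
      ring
    · have hbx : b ≠ x := fun he => (List.nodup_cons.mp hu).1 (he ▸ h)
      rw [if_neg hbx, ih (List.nodup_cons.mp hu).2 h]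
      ring

-- pointwise sum of two weight maps splits
theorem pv_sum_map_add (f g : Char → Int) (u : List Char) :
    (u.map (fun k => f k + g k)).sum = (u.map f).sum + (u.map g).sum := by
  induction u with
  | nil => simp
  | cons b v ih => simp only [List.map_cons, List.sum_cons, ih]; ring

-- weighted sum over distinct characters with multiplicities = plain sum of weights
theorem pv_group_sum (w : Char → Int) (l u : List Char) (hu : u.Nodup)
    (hsub : ∀ x ∈ l, x ∈ u) :
    (u.map (fun k => w k * (l.count k : Int))).sum = (l.map w).sum := by
  induction l with
  | nil => simp
  | cons x t ih =>
    have hsubt : ∀ y ∈ t, y ∈ u := fun y hy => hsub y (List.mem_cons_of_mem _ hy)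
    have hx : x ∈ u := hsub x List.mem_cons_self
    have hpt : ∀ k ∈ u, w k * (((x :: t).count k : Nat) : Int)
        = w k * (t.count k : Int) + (if k = x then w k else 0) := by
      intro k _
      rw [List.count_cons]
      by_cases h : k = x
      · rw [if_pos (by simp [h]), if_pos h]; push_cast; ring
      · rw [if_neg (by simp; exact fun he => h he.symm), if_neg h]; simp
    rw [List.map_congr_left hpt, pv_sum_map_add, ih hsubt,
        pv_sum_indicator w u hu x hx, List.map_cons, List.sum_cons]
    ring

-- ===== VERDICT (by name: the statement is the Claim_ definition above) =====
theorem countVowelConsonant_spec : Claim_equal_countVowelConsonant := by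
  intro s _
  unfold Spec_countVowelConsonant countVowelConsonant countVowelConsonant_alt
  rw [pv_foldA]
  simp only [PySem.Dict.foldl_insert_getD_add_one_eq_counter, PySem.Dict.items_counter,
    List.map_map, zero_add]
  exact (pv_group_sum (fun x => if x ∈ "aeiou".toList then (1 : Int) else 2) s.toList
    (PySem.Set.ofList s.toList) (PySem.Set.nodup_ofList _)
    (fun x hx => (PySem.Set.mem_ofList _ _).mpr hx)).symm
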